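-- pv_equiv track=rewrite | github.com/neerajsinghjr/dsa | LoveBabbar/01.Arrays/P0024-Print numbers greater than pivot.py | bruteForceSol1ution
-- ===== SOURCE A (Python) =====
-- def bruteForceSol1ution(nums, key):
--     size,res = len(nums),[]
--     key = key//size
--     for x in range(size):
--         count = 1
--         for y in range(x+1,size):
--             if(nums[x] == nums[y]):     # count key
--                 count += 1
--         if(count > key):                # count greater than key
--             res.append(nums[x])
--
--     return res
-- ===== SOURCE B (Python) =====
-- def bruteForceSol1ution(nums, key):
--     # One pass with precomputed totals: element kept iff (occurrences in its
--     # suffix) = total[v] - (occurrences before it) exceeds key // len(nums).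
--     k = key // len(nums)
--     total = {}
--     for v in nums:
--         total[v] = total.get(v, 0) + 1
--     res = []
--     seen = {}
--     for v in nums:
--         if total[v] - seen.get(v, 0) > k:
--             res.append(v)
--         seen[v] = seen.get(v, 0) + 1
--     return res
-- ===== Notes on version B (the rewrite author's own statement) =====
-- stated objective: faster
-- what changed: Replaced the quadratic nested index loops (re-scanning the suffix for every element) with a precomputed frequency dict and a single pass that derives each suffix count as total[v] minus the count seen so far.
import Mathlib
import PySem

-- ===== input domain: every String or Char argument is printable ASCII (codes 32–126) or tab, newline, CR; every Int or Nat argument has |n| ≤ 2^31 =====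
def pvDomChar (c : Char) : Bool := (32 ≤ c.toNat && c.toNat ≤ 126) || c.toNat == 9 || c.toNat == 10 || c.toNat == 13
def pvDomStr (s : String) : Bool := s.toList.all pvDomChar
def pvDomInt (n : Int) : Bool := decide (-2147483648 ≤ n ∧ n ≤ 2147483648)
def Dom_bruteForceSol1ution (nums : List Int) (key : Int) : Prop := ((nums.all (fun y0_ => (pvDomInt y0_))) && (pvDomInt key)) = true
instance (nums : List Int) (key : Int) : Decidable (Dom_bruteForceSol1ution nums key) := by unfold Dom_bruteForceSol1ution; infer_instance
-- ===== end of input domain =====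

-- B replaces A's nested suffix re-scans with a precomputed frequency dict and one pass
-- that derives each suffix count as total minus the prefix count (objective: faster).

-- ===== PORT A =====
def bruteForceSol1ution (nums : List Int) (key : Int) : List Int :=
  let size : Int := PySem.List.len nums
  let key : Int := PySem.Int.floordiv key size
  (PySem.List.pyRange 0 size).foldl
    (fun res x =>
      let count : Int :=
        (PySem.List.pyRange (x + 1) size).foldl
          (fun count y =>
            if PySem.List.pyGetD nums x 0 = PySem.List.pyGetD nums y 0 then count + 1 else count)
          1
      if count > key then res ++ [PySem.List.pyGetD nums x 0] else res)
    []

-- ===== PORT B =====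
def bruteForceSol1ution_alt (nums : List Int) (key : Int) : List Int :=
  let k : Int := PySem.Int.floordiv key (PySem.List.len nums)
  let total : PySem.Dict Int Int :=
    nums.foldl (fun d v => d.insert v (d.getD v 0 + 1)) PySem.Dict.empty
  (nums.foldl
    (fun (st : List Int × PySem.Dict Int Int) v =>
      ((if total.getD v 0 - st.2.getD v 0 > k then st.1 ++ [v] else st.1),
       st.2.insert v (st.2.getD v 0 + 1)))
    ([], PySem.Dict.empty)).1

-- ===== PRECONDITION & SPEC =====
-- Pre_ excludes only the empty list, where both A and B raise ZeroDivisionError (key // len(nums)).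
def Pre_bruteForceSol1ution (nums : List Int) (key : Int) : Prop := nums ≠ []
instance (nums : List Int) (key : Int) : Decidable (Pre_bruteForceSol1ution nums key) := by unfold Pre_bruteForceSol1ution; infer_instance
def pvWitness_bruteForceSol1ution : List Int × Int := ([2, 1, 2, 3, 2], 7)

def Spec_bruteForceSol1ution (nums : List Int) (key : Int) (out : List Int) : Prop := out = bruteForceSol1ution_alt nums key
instance (nums : List Int) (key : Int) (out : List Int) : Decidable (Spec_bruteForceSol1ution nums key out) := by unfold Spec_bruteForceSol1ution; infer_instance

-- ===== CLAIM (what is proved, stated in full; the proofs are below) =====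
def Claim_equal_bruteForceSol1ution : Prop := ∀ (nums : List Int) (key : Int), Dom_bruteForceSol1ution nums key → Pre_bruteForceSol1ution nums key → Spec_bruteForceSol1ution nums key (bruteForceSol1ution nums key)

-- ===== LEMMAS AND PROOFS =====

-- Reference selection both ports compute: keep v iff its count in its own suffix exceeds k.
def pvSel (k : Int) : List Int → List Int
  | [] => []
  | v :: t => if ((v :: t).count v : Int) > k then v :: pvSel k t else pvSel k t

lemma pvSel_cons (k v : Int) (t : List Int) :
    pvSel k (v :: t) = if ((v :: t).count v : Int) > k then v :: pvSel k t else pvSel k t := rfl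

lemma cntP (v : Int) (l : List Int) : l.countP (fun w => decide (v = w)) = l.count v := by
  rw [List.count_eq_countP]
  refine List.countP_congr ?_
  intro x _
  by_cases h : v = x
  · simp [h]
  · have h2 : ¬ (x = v) := fun hh => h hh.symm
    simp [h, h2]

-- A's inner loop = count of nums[a] in the suffix starting at a
lemma innerCount (nums : List Int) (a : Nat) (ha : a < nums.length) :
    (PySem.List.pyRange ((a : Int) + 1) (PySem.List.len nums)).foldl
      (fun count y =>
        if PySem.List.pyGetD nums (a : Int) 0 = PySem.List.pyGetD nums y 0 then count + 1 else count)
      1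
    = ((nums.drop a).count nums[a] : Int) := by
  have h1 : ((a : Int) + 1) = (((a + 1 : Nat)) : Int) := by push_cast; ring
  rw [h1, PySem.List.foldl_pyRange_pyGetD nums 0
        (fun count w => if PySem.List.pyGetD nums (a : Int) 0 = w then count + 1 else count) 1
        (by positivity)]
  rw [PySem.List.foldl_ite_add_one (fun w => PySem.List.pyGetD nums (a : Int) 0 = w)]
  rw [cntP]
  rw [PySem.List.pyGetD_eq_getElem nums 0 (by positivity) (by exact_mod_cast ha)]
  simp only [Int.toNat_natCast]
  rw [List.drop_eq_getElem_cons ha, List.count_cons_self]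
  push_cast; ring

-- A's outer loop = pvSel over the remaining suffix (accumulator generalized)
lemma A_loop (nums : List Int) (k : Int) :
    ∀ (n a : Nat) (acc : List Int), nums.length ≤ a + n →
    (PySem.List.pyRange (a : Int) (PySem.List.len nums)).foldl
      (fun res x =>
        let count : Int :=
          (PySem.List.pyRange (x + 1) (PySem.List.len nums)).foldl
            (fun count y =>
              if PySem.List.pyGetD nums x 0 = PySem.List.pyGetD nums y 0 then count + 1 else count)
            1
        if count > k then res ++ [PySem.List.pyGetD nums x 0] else res)
      acc
    = acc ++ pvSel k (nums.drop a) := by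
  intro n
  induction n with
  | zero =>
      intro a acc h
      have hge : (PySem.List.len nums : Int) ≤ (a : Int) := by
        simp [PySem.List.len_eq]; exact_mod_cast (by omega : nums.length ≤ a)
      rw [PySem.List.pyRange_one_eq_nil hge]
      rw [List.drop_eq_nil_of_le (by omega)]
      simp [pvSel]
  | succ n ih =>
      intro a acc h
      by_cases ha : a < nums.length
      · have hlt : (a : Int) < PySem.List.len nums := by
          simp [PySem.List.len_eq]; exact_mod_cast ha
        rw [PySem.List.pyRange_one_cons hlt]
        simp only [List.foldl_cons, innerCount nums a ha]
        rw [PySem.List.pyGetD_eq_getElem nums 0 (by positivity) (by exact_mod_cast ha)]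
        simp only [Int.toNat_natCast]
        rw [List.drop_eq_getElem_cons ha, pvSel_cons]
        have hcast : ((a : Int) + 1) = (((a + 1 : Nat)) : Int) := by push_cast; ring
        by_cases hc : (((nums[a] :: nums.drop (a + 1)).count nums[a] : Int) > k)
        · simp only [if_pos hc]
          rw [hcast, ih (a + 1) (acc ++ [nums[a]]) (by omega)]
          simp
        · simp only [if_neg hc]
          rw [hcast, ih (a + 1) acc (by omega)]
      · have hge : (PySem.List.len nums : Int) ≤ (a : Int) := by
          simp [PySem.List.len_eq]; exact_mod_cast (by omega : nums.length ≤ a)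
        rw [PySem.List.pyRange_one_eq_nil hge]
        rw [List.drop_eq_nil_of_le (by omega)]
        simp [pvSel]

lemma portA_eq_sel (nums : List Int) (key : Int) :
    bruteForceSol1ution nums key = pvSel (PySem.Int.floordiv key (PySem.List.len nums)) nums := by
  unfold bruteForceSol1ution
  have h0 : ((0 : Nat) : Int) = 0 := by norm_num
  have := A_loop nums (PySem.Int.floordiv key (PySem.List.len nums)) nums.length 0 [] (by omega)
  rw [h0] at this
  simpa using this

-- B's counting fold: lookup = initial value + count
lemma counterIns_getD (l : List Int) (d : PySem.Dict Int Int) (v : Int) :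
    (l.foldl (fun d v => d.insert v (d.getD v 0 + 1)) d).getD v 0 = d.getD v 0 + l.count v := by
  induction l generalizing d with
  | nil => simp
  | cons x t ih =>
      simp only [List.foldl_cons, ih, PySem.Dict.getD_insert]
      by_cases hvx : v = x
      · simp [hvx, List.count_cons_self]; ring
      · have h2 : ¬ (x = v) := fun hh => hvx hh.symm
        simp [hvx, List.count_cons_of_ne (fun hh => h2 (by exact_mod_cast hh))]

-- B's main pass = pvSel, with the invariant total - seen = count in the remaining suffix
lemma B_loop (k : Int) (total : PySem.Dict Int Int) :
    ∀ (t acc : List Int) (seen : PySem.Dict Int Int),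
      (∀ v, total.getD v 0 - seen.getD v 0 = (t.count v : Int)) →
      (t.foldl
        (fun (st : List Int × PySem.Dict Int Int) v =>
          ((if total.getD v 0 - st.2.getD v 0 > k then st.1 ++ [v] else st.1),
           st.2.insert v (st.2.getD v 0 + 1)))
        (acc, seen)).1
      = acc ++ pvSel k t := by
  intro t
  induction t with
  | nil => intro acc seen _; simp [pvSel]
  | cons v t ih =>
      intro acc seen hinv
      simp only [List.foldl_cons]
      have hcond : total.getD v 0 - seen.getD v 0 = (((v :: t).count v : Nat) : Int) := hinv v
      have hnext : ∀ w, total.getD w 0 - (seen.insert v (seen.getD v 0 + 1)).getD w 0 = (t.count w : Int) := by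
        intro w
        rw [PySem.Dict.getD_insert]
        by_cases hwv : w = v
        · subst hwv
          rw [if_pos rfl]
          have h3 := hinv w
          rw [List.count_cons_self] at h3
          push_cast at h3
          omega
        · rw [if_neg hwv]
          have h3 := hinv w
          rwa [List.count_cons_of_ne (fun hh => hwv hh.symm)] at h3
      rw [pvSel_cons]
      by_cases hc : (((v :: t).count v : Int) > k)
      · rw [if_pos hc, if_pos (by rw [hcond]; exact_mod_cast hc)]
        rw [ih (acc ++ [v]) _ hnext]
        simp
      · rw [if_neg hc, if_neg (by rw [hcond]; exact_mod_cast hc)]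
        exact ih acc _ hnext

lemma portB_eq_sel (nums : List Int) (key : Int) :
    bruteForceSol1ution_alt nums key = pvSel (PySem.Int.floordiv key (PySem.List.len nums)) nums := by
  unfold bruteForceSol1ution_alt
  refine B_loop _ _ nums [] PySem.Dict.empty ?_ |>.trans (by simp)
  intro v
  rw [counterIns_getD]
  simp

-- ===== VERDICT (by name: the statement is the Claim_ definition above) =====
theorem bruteForceSol1ution_spec : Claim_equal_bruteForceSol1ution := by
  intro nums key _ _
  unfold Spec_bruteForceSol1ution
  rw [portA_eq_sel nums key, portB_eq_sel nums key]
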